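-- pv_equiv track=rewrite | github.com/Tom-game-project/Lichen | clay_model/calc_parser.py | grouping_brackets
-- ===== SOURCE A (Python) =====
-- def grouping_brackets(vec:list[str]) -> list[str]:
--     # functionをまとめる
--     rlist:list[str] = list()
--     group:list[str] = list()
--     depth:int = 0
--     flag:bool = False
--     for i in vec:
--         match i:
--             case "(":
--                 if depth > 0:
--                     group.append(i)
--                 elif depth == 0:
--                     group.append(i)
--                     flag = True
--                 else:
--                     raise BaseException("括弧を閉じ忘れている可能性があります")
--                 depth += 1
--             case ")":
--                 depth -= 1
--                 if depth > 0:
--                     group.append(i)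
--                 elif depth == 0:
--                     group.append(i)
--                     rlist.append("".join(group))
--                     group = []
--                     flag = False
--                 else:
--                     raise BaseException("括弧を開き過ぎている可能性があります")
--             case _:
--                 if flag:
--                     group.append(i)
--                 else:
--                     rlist.append(i)
--     return rlist
-- ===== SOURCE B (Python) =====
-- def grouping_brackets(vec):
--     out = []
--     j = 0
--     n = len(vec)
--     while j < n:
--         t = vec[j]
--         if t == "(":
--             depth = 1
--             k = j + 1
--             while k < n and depth > 0:
--                 if vec[k] == "(":
--                     depth += 1
--                 elif vec[k] == ")":
--                     depth -= 1
--                 k += 1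
--             if depth == 0:
--                 out.append("".join(vec[j:k]))
--                 j = k
--             else:
--                 break  # unclosed trailing group: dropped, like A
--         elif t == ")":
--             raise BaseException("括弧を開き過ぎている可能性があります")
--         else:
--             out.append(t)
--             j += 1
--     return out
-- ===== Notes on version B (the rewrite author's own statement) =====
-- stated objective: alternative
-- what changed: Replaces A's flat depth/flag state-machine fold with an index-based scan that, at each top-level '(', locates the matching ')' with a local depth counter and joins that whole slice at once.
import Mathlib
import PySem

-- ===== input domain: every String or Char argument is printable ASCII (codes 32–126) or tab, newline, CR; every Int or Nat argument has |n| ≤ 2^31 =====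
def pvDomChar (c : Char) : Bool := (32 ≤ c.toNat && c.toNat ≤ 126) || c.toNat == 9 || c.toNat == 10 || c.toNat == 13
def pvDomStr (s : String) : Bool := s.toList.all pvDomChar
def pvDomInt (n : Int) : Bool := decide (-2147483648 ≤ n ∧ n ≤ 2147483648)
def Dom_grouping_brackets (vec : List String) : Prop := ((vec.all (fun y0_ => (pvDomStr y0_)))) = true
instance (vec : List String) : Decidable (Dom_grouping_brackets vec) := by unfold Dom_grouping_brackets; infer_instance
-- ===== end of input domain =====

-- B groups top-level bracketed runs by scanning ahead for the matching ')' and slicing,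
-- instead of A's depth/flag state machine; same result on every input where A returns.

-- ===== PORT A =====
-- state machine of A: rlist, group, depth, flag.  The two `raise BaseException` branches
-- of A are excluded by Pre_; the port returns the accumulator there (value never claimed).
def pvGoA : List String → List String → List String → Int → Bool → List String
  | [], rlist, _, _, _ => rlist
  | i :: rest, rlist, group, depth, flag =>
    if i = "(" then
      if depth > 0 then pvGoA rest rlist (group ++ [i]) (depth + 1) flag
      else if depth = 0 then pvGoA rest rlist (group ++ [i]) (depth + 1) true
      else rlist  -- raise BaseException (unreachable / excluded by Pre_)
    else if i = ")" then
      let d := depth - 1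
      if d > 0 then pvGoA rest rlist (group ++ [i]) d flag
      else if d = 0 then pvGoA rest (rlist ++ [String.join (group ++ [i])]) [] d false
      else rlist  -- raise BaseException (excluded by Pre_)
    else
      if flag then pvGoA rest rlist (group ++ [i]) depth flag
      else pvGoA rest (rlist ++ [i]) group depth flag

def grouping_brackets (vec : List String) : List String :=
  pvGoA vec [] [] 0 false

-- ===== PORT B =====
-- inner while loop of B: consume tokens while depth > 0, return (#consumed, final depth)
def pvScanClose : List String → Int → Nat × Int
  | [], depth => (0, depth)
  | t :: rest, depth =>
    if depth ≤ 0 then (0, depth)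
    else
      let d := if t = "(" then depth + 1 else if t = ")" then depth - 1 else depth
      let p := pvScanClose rest d
      (p.1 + 1, p.2)

-- outer while loop of B over the remaining suffix of vec
def pvGoB : List String → List String → List String
  | [], out => out
  | t :: rest, out =>
    if t = "(" then
      let p := pvScanClose rest 1
      if p.2 = 0 then pvGoB (rest.drop p.1) (out ++ [String.join (t :: rest.take p.1)])
      else out  -- unclosed trailing group: dropped
    else if t = ")" then out  -- raise BaseException (excluded by Pre_)
    else pvGoB rest (out ++ [t])
termination_by l _ => l.length
decreasing_by
  · simp [List.length_drop]
  · simp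

def grouping_brackets_alt (vec : List String) : List String :=
  pvGoB vec []

-- ===== PRECONDITION & SPEC =====
-- Pre_ excludes exactly the inputs on which A raises BaseException: some prefix closes
-- more brackets than it opens (a stray top-level ')'); B raises there too.
def Pre_grouping_brackets (vec : List String) : Prop :=
  ∀ k ∈ List.range (vec.length + 1), (vec.take k).count ")" ≤ (vec.take k).count "("
instance (vec : List String) : Decidable (Pre_grouping_brackets vec) := by
  unfold Pre_grouping_brackets; infer_instance

def pvWitness_grouping_brackets : List String := ["f", "(", "a", "+", "b", ")", "c"]

def Spec_grouping_brackets (vec : List String) (out : List String) : Prop := out = grouping_brackets_alt vec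
instance (vec : List String) (out : List String) : Decidable (Spec_grouping_brackets vec out) := by unfold Spec_grouping_brackets; infer_instance

-- ===== CLAIM (what is proved, stated in full; the proofs are below) =====
def Claim_equal_grouping_brackets : Prop := ∀ (vec : List String), Dom_grouping_brackets vec → Pre_grouping_brackets vec → Spec_grouping_brackets vec (grouping_brackets vec)

-- ===== LEMMAS AND PROOFS =====

-- In group mode (flag = true, depth > 0) A collects tokens until depth returns to 0;
-- that is exactly what B's inner scan pvScanClose measures.
theorem pvScanClose_nonpos (l : List String) (d : Int) (h : d ≤ 0) :
    pvScanClose l d = (0, d) := by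
  cases l <;> simp [pvScanClose, h]

theorem pvGroup (l : List String) : ∀ (group rlist : List String) (depth : Int), 0 < depth →
    pvGoA l rlist group depth true =
      (if (pvScanClose l depth).2 = 0 then
        pvGoA (l.drop (pvScanClose l depth).1)
          (rlist ++ [String.join (group ++ l.take (pvScanClose l depth).1)]) [] 0 false
      else rlist) := by
  induction l with
  | nil =>
    intro group rlist depth hd
    simp [pvGoA, pvScanClose]
    omega
  | cons t rest ih =>
    intro group rlist depth hd
    by_cases h1 : t = "("
    · subst h1
      simp only [pvGoA, pvScanClose, if_pos hd,
        if_neg (by omega : ¬ (depth : Int) ≤ 0)]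
      rw [ih (group ++ ["("]) rlist (depth + 1) (by omega)]
      simp
    · by_cases h2 : t = ")"
      · subst h2
        simp only [pvGoA, pvScanClose, if_neg (by decide : ¬ (")" : String) = "("),
          if_neg (by omega : ¬ (depth : Int) ≤ 0)]
        by_cases hgt : depth - 1 > 0
        · simp only [if_pos hgt]
          rw [ih (group ++ [")"]) rlist (depth - 1) hgt]
          simp
        · have hz : depth - 1 = 0 := by omega
          simp [hz, pvScanClose_nonpos rest 0 le_rfl]
      · simp only [pvGoA, pvScanClose, if_neg h1, if_neg h2,
          if_neg (by omega : ¬ (depth : Int) ≤ 0)]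
        rw [ih (group ++ [t]) rlist depth hd]
        simp

-- top level: A\'s state machine starting in (group = [], depth = 0, flag = false)
-- computes the same list as B\'s scan-and-slice loop (the raise branches of both
-- ports return their accumulator, so this holds for every vec).
theorem pvMain : ∀ (n : Nat) (vec rlist : List String), vec.length ≤ n →
    pvGoA vec rlist [] 0 false = pvGoB vec rlist := by
  intro n
  induction n with
  | zero =>
    intro vec rlist h
    have : vec = [] := List.eq_nil_of_length_eq_zero (by omega)
    subst this; simp [pvGoA, pvGoB]
  | succ n ih =>
    intro vec rlist h
    match vec with
    | [] => simp [pvGoA, pvGoB]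
    | t :: rest =>
      by_cases h1 : t = "("
      · subst h1
        simp only [pvGoA, pvGoB]
        simp only [gt_iff_lt, lt_self_iff_false, if_false,
          zero_add, List.nil_append]
        rw [pvGroup rest ["("] rlist 1 (by omega)]
        by_cases hz : (pvScanClose rest 1).2 = 0
        · simp only [if_pos hz]
          rw [ih (rest.drop (pvScanClose rest 1).1) _ (by simp at h ⊢; omega)]
          simp
        · simp only [if_neg hz]
          simp
      · by_cases h2 : t = ")"
        · subst h2
          simp [pvGoA, pvGoB]
        · simp only [pvGoA, pvGoB, if_neg h1, if_neg h2]
          exact ih rest (rlist ++ [t]) (by simp at h; omega)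

-- ===== VERDICT (by name: the statement is the Claim_ definition above) =====
theorem grouping_brackets_spec : Claim_equal_grouping_brackets := by
  intro vec _ _
  unfold Spec_grouping_brackets grouping_brackets grouping_brackets_alt
  exact pvMain vec.length vec [] le_rfl
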